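-- pv_equiv track=rewrite | github.com/laraburic/python-assignment-1 | assignment1.py | fun_exercise_6
-- ===== SOURCE A (Python) =====
-- def fun_exercise_6(x):
--     ascii_m = 109
--     ascii_z = 122
--
--     char_list = []
--
--     for index in range(0, len(x)):
--         is_char_added = False
--
--         for ascii_num in range(ascii_m, ascii_z + 1):
--             if x[index] == chr(ascii_num):
--                 # Uppercase ASCII = Lowercase ASCII - 32
--                 char_to_add = chr(ascii_num - 32)
--                 char_list.append(char_to_add)
--                 is_char_added = True
--
--         if not is_char_added:
--             char_to_add = x[index]
--             char_list.append(char_to_add)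
--
--     string_to_return = "".join(char_list)
--
--     return string_to_return
-- ===== SOURCE B (Python) =====
-- def fun_exercise_6(x):
--     parts = []
--     i = 0
--     n = len(x)
--     while i < n:
--         if 'm' <= x[i] <= 'z':
--             j = i
--             while j < n and 'm' <= x[j] <= 'z':
--                 j += 1
--             parts.append(x[i:j].upper())
--             i = j
--         else:
--             parts.append(x[i])
--             i += 1
--     return ''.join(parts)
-- ===== Notes on version B (the rewrite author's own statement) =====
-- stated objective: alternative
-- what changed: Replaces A's per-character inner scan over the 14 candidate letters by a run-based pass: it scans maximal runs of lowercase letters in the target range and uppercases each whole run at once with str.upper(), copying other characters singly.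
import Mathlib
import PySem

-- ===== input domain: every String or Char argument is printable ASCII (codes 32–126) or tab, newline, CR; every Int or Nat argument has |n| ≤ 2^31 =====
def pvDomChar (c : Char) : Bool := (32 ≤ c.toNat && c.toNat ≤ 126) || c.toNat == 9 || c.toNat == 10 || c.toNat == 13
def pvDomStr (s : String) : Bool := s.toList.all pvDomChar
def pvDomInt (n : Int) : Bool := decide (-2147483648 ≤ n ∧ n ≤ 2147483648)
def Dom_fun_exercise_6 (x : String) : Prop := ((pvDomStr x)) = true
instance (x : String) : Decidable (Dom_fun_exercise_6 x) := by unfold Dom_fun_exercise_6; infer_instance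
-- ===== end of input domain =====

-- B scans for maximal runs of 'm'..'z' characters and uppercases each whole run at once
-- with str.upper(), instead of A's inner scan over the 14 candidate letters per character
-- (objective: alternative).

-- ===== PORT A =====
-- inner loop of A: for ascii_num in range(109, 123): if x[index] == chr(ascii_num): append chr(ascii_num-32); flag
def pvInnerA (c : Char) (st : List Char × Bool) : List Char × Bool :=
  (PySem.List.pyRange 109 123 1).foldl
    (fun st n =>
      if c = Char.ofNat n.toNat then (st.1 ++ [Char.ofNat (n.toNat - 32)], true) else st)
    st

def fun_exercise_6 (x : String) : String :=
  let charList := x.toList.foldl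
    (fun acc c =>
      let st := pvInnerA c (acc, false)
      if !st.2 then st.1 ++ [c] else st.1)
    []
  String.ofList charList

-- ===== PORT B =====
-- 'm' <= c <= 'z'
def pvIsMZ (c : Char) : Bool := 'm' ≤ c && c ≤ 'z'

-- Source B's outer while loop, as structural recursion: on a run head, the inner while
-- advances j over the maximal 'm'..'z' run (takeWhile), the run slice is uppercased
-- at once (PySem.Chars.upper = str.upper) and the loop resumes after it (dropWhile);
-- otherwise the single character is copied.
def pvRunLoop : List Char → List Char
  | [] => []
  | c :: rest =>
    if pvIsMZ c then
      PySem.Chars.upper (c :: rest.takeWhile pvIsMZ) ++ pvRunLoop (rest.dropWhile pvIsMZ)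
    else
      c :: pvRunLoop rest
termination_by l => l.length
decreasing_by
  · simpa using Nat.lt_succ_of_le (List.length_dropWhile_le pvIsMZ rest)
  · simp

def fun_exercise_6_alt (x : String) : String :=
  String.ofList (pvRunLoop x.toList)

-- ===== PRECONDITION & SPEC =====
def Spec_fun_exercise_6 (x : String) (out : String) : Prop := out = fun_exercise_6_alt x
instance (x : String) (out : String) : Decidable (Spec_fun_exercise_6 x out) := by unfold Spec_fun_exercise_6; infer_instance

-- ===== CLAIM (what is proved, stated in full; the proofs are below) =====
def Claim_equal_fun_exercise_6 : Prop := ∀ (x : String), Dom_fun_exercise_6 x → Spec_fun_exercise_6 x (fun_exercise_6 x)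

-- ===== LEMMAS AND PROOFS =====

-- the common per-character value both programs compute
def pvG (c : Char) : Char := if pvIsMZ c then Char.ofNat (c.toNat - 32) else c

theorem pvIsMZ_iff (c : Char) : pvIsMZ c = true ↔ 109 ≤ c.toNat ∧ c.toNat ≤ 122 := by
  simp only [pvIsMZ, Bool.and_eq_true, decide_eq_true_eq, Char.le_def]
  constructor
  · rintro ⟨h1, h2⟩
    exact ⟨h1, h2⟩
  · rintro ⟨h1, h2⟩
    exact ⟨h1, h2⟩

-- ---- A's side: the fold is map pvG ----

-- A's inner fold only appends: factor out the accumulator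
theorem pvInnerA_factor_aux (c : Char) (l : List Int) (acc : List Char) (b : Bool) :
    l.foldl (fun st n => if c = Char.ofNat n.toNat then (st.1 ++ [Char.ofNat (n.toNat - 32)], true) else st) (acc, b)
      = (acc ++ (l.foldl (fun st n => if c = Char.ofNat n.toNat then (st.1 ++ [Char.ofNat (n.toNat - 32)], true) else st) ([], b)).1,
         (l.foldl (fun st n => if c = Char.ofNat n.toNat then (st.1 ++ [Char.ofNat (n.toNat - 32)], true) else st) ([], b)).2) := by
  induction l generalizing acc b with
  | nil => simp
  | cons n l ih =>
    simp only [List.foldl_cons]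
    by_cases h : c = Char.ofNat n.toNat
    · simp only [if_pos h]
      rw [ih (acc ++ [Char.ofNat (n.toNat - 32)]) true, ih ([] ++ [Char.ofNat (n.toNat - 32)]) true]
      simp
    · simp only [if_neg h]
      exact ih acc b

theorem pvInnerA_factor (c : Char) (acc : List Char) :
    pvInnerA c (acc, false) = (acc ++ (pvInnerA c ([], false)).1, (pvInnerA c ([], false)).2) := by
  unfold pvInnerA
  exact pvInnerA_factor_aux c _ acc false

-- if c matches none of the scanned codes, the inner fold is the identity
theorem pvInnerA_none (c : Char) (l : List Int) (st : List Char × Bool)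
    (h : ∀ n ∈ l, c ≠ Char.ofNat n.toNat) :
    l.foldl (fun st n => if c = Char.ofNat n.toNat then (st.1 ++ [Char.ofNat (n.toNat - 32)], true) else st) st = st := by
  induction l generalizing st with
  | nil => rfl
  | cons n l ih =>
    simp only [List.foldl_cons, if_neg (h n (List.mem_cons_self))]
    exact ih st (fun m hm => h m (List.mem_cons_of_mem _ hm))

-- the key per-character lemma: A's step produces exactly pvG c
theorem pv_key (c : Char) :
    (if !(pvInnerA c ([], false)).2 then (pvInnerA c ([], false)).1 ++ [c] else (pvInnerA c ([], false)).1)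
      = [pvG c] := by
  by_cases h : 109 ≤ c.toNat ∧ c.toNat ≤ 122
  · have hv : ∃ n, 109 ≤ n ∧ n ≤ 122 ∧ c = Char.ofNat n := by
      refine ⟨c.toNat, h.1, h.2, ?_⟩
      exact (Char.ofNat_toNat c).symm
    obtain ⟨n, h1, h2, rfl⟩ := hv
    interval_cases n <;> decide
  · have hlo : c.toNat < 109 ∨ 122 < c.toNat := by omega
    have hnone : ∀ n ∈ PySem.List.pyRange 109 123 1, c ≠ Char.ofNat n.toNat := by
      intro n hn
      rw [PySem.List.mem_pyRange_one] at hn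
      intro hc
      have hval : (Char.ofNat n.toNat).toNat = n.toNat := by
        rw [Char.toNat_ofNat, if_pos]
        simp only [Nat.isValidChar]
        omega
      have ht : c.toNat = n.toNat := by rw [hc, hval]
      omega
    have hinner : pvInnerA c ([], false) = ([], false) :=
      pvInnerA_none c _ _ hnone
    have hmz : pvIsMZ c = false := by
      rw [Bool.eq_false_iff]
      intro hb
      have := (pvIsMZ_iff c).mp hb
      omega
    rw [hinner]
    simp [pvG, hmz]

-- folding A's per-char step is mapping pvG
theorem pv_fold_eq_map (l : List Char) (acc : List Char) :
    l.foldl (fun acc c =>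
        let st := pvInnerA c (acc, false)
        if !st.2 then st.1 ++ [c] else st.1) acc
      = acc ++ l.map pvG := by
  induction l generalizing acc with
  | nil => simp
  | cons c l ih =>
    simp only [List.foldl_cons, List.map_cons]
    have hstep :
        (let st := pvInnerA c (acc, false); if !st.2 then st.1 ++ [c] else st.1)
          = acc ++ [pvG c] := by
      show (if !(pvInnerA c (acc, false)).2 then (pvInnerA c (acc, false)).1 ++ [c]
            else (pvInnerA c (acc, false)).1) = acc ++ [pvG c]
      rw [pvInnerA_factor]
      have hk := pv_key c
      by_cases hb : (pvInnerA c ([], false)).2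
      · simp only [hb, Bool.not_true, Bool.false_eq_true, if_false] at hk ⊢
        rw [hk]
      · simp only [Bool.not_eq_true] at hb
        simp only [hb, Bool.not_false, if_true] at hk ⊢
        rw [List.append_assoc, hk]
    rw [hstep, ih, List.append_assoc]
    rfl

-- ---- B's side: the run loop is map pvG ----

-- on an 'm'..'z' character, upperChar is exactly code − 32
theorem pv_upperChar_mz (c : Char) (h : pvIsMZ c = true) :
    PySem.Chars.upperChar c = Char.ofNat (c.toNat - 32) := by
  obtain ⟨h1, h2⟩ := (pvIsMZ_iff c).mp h
  have hv : ∃ n, 109 ≤ n ∧ n ≤ 122 ∧ c = Char.ofNat n := by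
    refine ⟨c.toNat, h1, h2, ?_⟩
    exact (Char.ofNat_toNat c).symm
  obtain ⟨n, hn1, hn2, rfl⟩ := hv
  interval_cases n <;> decide

theorem pvRunLoop_eq_map (l : List Char) : pvRunLoop l = l.map pvG := by
  induction l using pvRunLoop.induct with
  | case1 => rw [pvRunLoop]; rfl
  | case2 c rest h ih =>
    rw [pvRunLoop, if_pos h, ih]
    have hrun : ∀ d ∈ c :: rest.takeWhile pvIsMZ, pvIsMZ d = true := by
      intro d hd
      rcases List.mem_cons.mp hd with rfl | hd
      · exact h
      · exact List.mem_takeWhile_imp hd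
    have hupper : PySem.Chars.upper (c :: rest.takeWhile pvIsMZ)
        = (c :: rest.takeWhile pvIsMZ).map pvG := by
      rw [PySem.Chars.upper]
      apply List.map_congr_left
      intro d hd
      rw [pv_upperChar_mz d (hrun d hd), pvG, if_pos (hrun d hd)]
    rw [hupper, ← List.map_append]
    simp [List.takeWhile_append_dropWhile]
  | case3 c rest h ih =>
    rw [pvRunLoop, if_neg h, ih]
    have : pvG c = c := by
      rw [pvG, if_neg h]
    rw [List.map_cons, this]

-- ===== VERDICT (by name: the statement is the Claim_ definition above) =====
theorem fun_exercise_6_spec : Claim_equal_fun_exercise_6 := by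
  intro x _
  show fun_exercise_6 x = fun_exercise_6_alt x
  unfold fun_exercise_6 fun_exercise_6_alt
  rw [pv_fold_eq_map, pvRunLoop_eq_map]
  rfl
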